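-- pv_equiv track=rewrite | github.com/dmitrysadovskii/QAP10 | Valeria_Kondrateva/hw_6/task_6_2.py | count
-- ===== SOURCE A (Python) =====
-- import collections
--
-- def count(letters):
--     count_dict = dict(collections.Counter(letters))
--     strings = []
--     for key, value in count_dict.items():
--         if value == 1:
--             strings.append("{}{}".format(key, ""))
--         else:
--             strings.append("{}{}".format(key, value))
--     result = "".join(strings)
--
--     return result
-- ===== SOURCE B (Python) =====
-- def count(letters):
--     s = list(letters)
--     out = []
--     while s:
--         c = s[0]
--         n = len(s)
--         s = [x for x in s if x != c]
--         k = n - len(s)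
--         out.append(c if k == 1 else c + str(k))
--     return "".join(out)
-- ===== Notes on version B (the rewrite author's own statement) =====
-- stated objective: alternative
-- what changed: Replaces the Counter frequency table with a shrink-by-removal loop: repeatedly take the first remaining character, delete all its occurrences by filtering the working list, and read its count off as the length difference.
import Mathlib
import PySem

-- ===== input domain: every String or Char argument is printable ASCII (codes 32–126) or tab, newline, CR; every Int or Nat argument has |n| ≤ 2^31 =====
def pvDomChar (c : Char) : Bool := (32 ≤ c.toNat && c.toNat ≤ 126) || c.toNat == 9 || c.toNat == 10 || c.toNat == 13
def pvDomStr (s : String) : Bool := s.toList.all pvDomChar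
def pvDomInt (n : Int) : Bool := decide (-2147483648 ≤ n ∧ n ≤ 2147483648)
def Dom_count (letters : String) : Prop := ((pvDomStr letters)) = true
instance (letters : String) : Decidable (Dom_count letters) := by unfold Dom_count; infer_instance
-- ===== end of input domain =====

-- B replaces Counter's frequency table with a shrink-by-removal loop: take the first remaining
-- character, filter out all its occurrences, and read its count off as the length difference
-- (objective: alternative decomposition, not faster).

-- ===== PORT A =====
-- A: count_dict = dict(Counter(letters)); for key, value in items: append key+"" or key+str(value); join.
def count (letters : String) : String :=
  let countDict := PySem.Dict.counter letters.toList
  let strings := countDict.items.foldl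
    (fun acc kv =>
      if kv.2 = 1 then acc ++ [String.ofList [kv.1]]
      else acc ++ [String.ofList [kv.1] ++ PySem.Int.toStr kv.2]) []
  PySem.Str.join "" strings

-- ===== PORT B =====
-- B: while s: c = s[0]; n = len(s); s = [x for x in s if x != c]; k = n - len(s); append c or c+str(k).
def countAltLoop : List Char → List String → List String
  | [], out => out
  | c :: rest, out =>
    let s := c :: rest
    let n : Int := s.length
    let s' := s.filter (fun x => x ≠ c)
    let k : Int := n - s'.length
    countAltLoop s'
      (out ++ [if k = 1 then String.ofList [c] else String.ofList [c] ++ PySem.Int.toStr k])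
termination_by s _ => s.length
decreasing_by
  have h := List.length_filter_le (fun x => !decide (x = c)) rest
  simp
  omega

def count_alt (letters : String) : String :=
  PySem.Str.join "" (countAltLoop letters.toList [])

-- ===== PRECONDITION & SPEC =====
def Spec_count (letters : String) (out : String) : Prop := out = count_alt letters
instance (letters : String) (out : String) : Decidable (Spec_count letters out) := by unfold Spec_count; infer_instance

-- ===== CLAIM (what is proved, stated in full; the proofs are below) =====
def Claim_equal_count : Prop := ∀ (letters : String), Dom_count letters → Spec_count letters (count letters)

-- ===== LEMMAS AND PROOFS =====

-- the string B emits for one distinct character, expressed through the global count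
def renderB (s : List Char) (c : Char) : String :=
  if (s.count c : Int) = 1 then String.ofList [c]
  else String.ofList [c] ++ PySem.Int.toStr (s.count c : Int)

theorem foldl_render_eq_map (l : List (Char × Int)) :
    ∀ (acc : List String),
      l.foldl (fun acc kv =>
        if kv.2 = 1 then acc ++ [String.ofList [kv.1]]
        else acc ++ [String.ofList [kv.1] ++ PySem.Int.toStr kv.2]) acc
      = acc ++ l.map (fun kv =>
          if kv.2 = 1 then String.ofList [kv.1]
          else String.ofList [kv.1] ++ PySem.Int.toStr kv.2) := by
  induction l with
  | nil => intro acc; simp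
  | cons kv t ih =>
    intro acc
    by_cases h : kv.2 = 1 <;> simp [List.foldl_cons, h, ih, List.append_assoc]

theorem foldl_add_cons (a : Char) (s m : List Char) (h : a ∉ m) :
    List.foldl PySem.Set.add (a :: s) m = a :: List.foldl PySem.Set.add s m := by
  induction m generalizing s with
  | nil => rfl
  | cons x t ih =>
    have hax : a ≠ x := fun e => h (e ▸ List.mem_cons_self)
    have h' : a ∉ t := fun e => h (List.mem_cons_of_mem _ e)
    by_cases hx : x ∈ s
    · simp [List.foldl_cons, PySem.Set.add, PySem.Set.contains, hx, ih _ h']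
    · have hxa : ¬ x = a := fun e => hax e.symm
      simp [List.foldl_cons, PySem.Set.add, PySem.Set.contains, hx, hxa, ih _ h',
        List.cons_append]

theorem mem_add_of_mem (c x : Char) (s : List Char) (h : c ∈ s) :
    c ∈ PySem.Set.add s x := by
  simp [PySem.Set.add]; split_ifs <;> simp [h]

theorem foldl_add_filter (c : Char) (m : List Char) :
    ∀ s : List Char, c ∈ s →
      List.foldl PySem.Set.add s m
        = List.foldl PySem.Set.add s (m.filter (fun x => x ≠ c)) := by
  induction m with
  | nil => intro s _; rfl
  | cons x t ih =>
    intro s hs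
    by_cases hx : x = c
    · subst hx
      have hadd : PySem.Set.add s x = s := by
        simp [PySem.Set.add, PySem.Set.contains, hs]
      simp [List.foldl_cons, hadd, ih s hs]
    · simp [List.foldl_cons, hx, ih (PySem.Set.add s x) (mem_add_of_mem c x s hs)]

theorem ofList_cons (c : Char) (rest : List Char) :
    PySem.Set.ofList (c :: rest)
      = c :: PySem.Set.ofList (rest.filter (fun x => x ≠ c)) := by
  have h1 : PySem.Set.ofList (c :: rest) = List.foldl PySem.Set.add [c] rest := by
    simp [PySem.Set.ofList_eq_foldl, List.foldl_cons, PySem.Set.add, PySem.Set.contains]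
  rw [h1, foldl_add_filter c rest [c] (by simp),
    foldl_add_cons c [] _ (by simp)]
  simp [PySem.Set.ofList_eq_foldl]

theorem length_sub_filter (c : Char) :
    ∀ l : List Char, l.length - (l.filter (fun x => x ≠ c)).length = l.count c := by
  intro l
  induction l with
  | nil => simp
  | cons x t ih =>
    by_cases hx : x = c
    · subst hx
      simp only [ne_eq, decide_not] at ih ⊢
      have hle := List.length_filter_le (fun y => !decide (y = x)) t
      simp
      omega
    · simp only [ne_eq, decide_not] at ih ⊢
      have hle := List.length_filter_le (fun y => !decide (y = c)) t
      simp [hx]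
      omega

theorem count_filter_ne (c d : Char) (hd : d ≠ c) :
    ∀ l : List Char, (l.filter (fun x => x ≠ c)).count d = l.count d := by
  intro l
  induction l with
  | nil => rfl
  | cons x t ih =>
    by_cases hx : x = c
    · subst hx
      have hcd : ¬ x = d := fun e => hd e.symm
      simp [hcd]
      simpa using ih
    · have hfc : (List.filter (fun y => decide (y ≠ c)) (x :: t))
          = x :: List.filter (fun y => decide (y ≠ c)) t := by
        simp [hx]
      rw [hfc]
      simp [List.count_cons]
      simpa using ih

theorem countAltLoop_eq :
    ∀ (n : Nat) (s : List Char), s.length ≤ n →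
      ∀ out, countAltLoop s out = out ++ (PySem.Set.ofList s).map (renderB s) := by
  intro n
  induction n with
  | zero =>
    intro s hs out
    have : s = [] := List.length_eq_zero_iff.1 (Nat.le_zero.1 hs)
    subst this; simp [countAltLoop, PySem.Set.ofList]
  | succ n ih =>
    intro s hs out
    match s with
    | [] => simp [countAltLoop, PySem.Set.ofList]
    | c :: rest =>
      have hfil : (c :: rest).filter (fun x => x ≠ c) = rest.filter (fun x => x ≠ c) := by
        simp
      have hlen : ((c :: rest).filter (fun x => x ≠ c)).length ≤ n := by
        rw [hfil]
        have := List.length_filter_le (fun x => decide (x ≠ c)) rest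
        simp only [List.length_cons] at hs
        omega
      have hcnt := length_sub_filter c (c :: rest)
      have hk : ((c :: rest).length : Int) - (((c :: rest).filter (fun x => x ≠ c)).length : Int)
          = ((c :: rest).count c : Int) := by
        have hle := List.length_filter_le (fun x => decide (x ≠ c)) (c :: rest)
        omega
      show countAltLoop (c :: rest) out = _
      rw [countAltLoop]
      rw [ih _ hlen]
      have hmap : ((PySem.Set.ofList ((c :: rest).filter (fun x => x ≠ c))).map
            (renderB ((c :: rest).filter (fun x => x ≠ c))))
          = ((PySem.Set.ofList ((c :: rest).filter (fun x => x ≠ c))).map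
            (renderB (c :: rest))) := by
        refine List.map_congr_left (fun d hdm => ?_)
        have hd : d ∈ (c :: rest).filter (fun x => x ≠ c) := by
          exact (PySem.Set.mem_ofList _ d).1 hdm
        have hdc : d ≠ c := by
          have := List.of_mem_filter hd
          simpa using this
        have hc2 := count_filter_ne c d hdc rest
        simp only [ne_eq, decide_not] at hc2
        have hcd2 : ¬ c = d := fun e => hdc e.symm
        simp [renderB, hc2, hcd2]
      rw [hmap]
      have hrend : (if ((c :: rest).length : Int) - (((c :: rest).filter (fun x => x ≠ c)).length : Int) = 1
            then String.ofList [c]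
            else String.ofList [c] ++ PySem.Int.toStr
              (((c :: rest).length : Int) - (((c :: rest).filter (fun x => x ≠ c)).length : Int)))
          = renderB (c :: rest) c := by
        rw [hk]; rfl
      rw [hrend]
      rw [ofList_cons c rest, ← hfil]
      simp [List.append_assoc]

-- ===== VERDICT (by name: the statement is the Claim_ definition above) =====
theorem count_spec : Claim_equal_count := by
  intro letters _
  show count letters = count_alt letters
  simp only [count, count_alt, foldl_render_eq_map, List.nil_append,
    PySem.Dict.items_counter,
    countAltLoop_eq letters.toList.length letters.toList (le_refl _) []]
  rw [List.map_map]
  rfl
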